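-- pv_equiv track=rewrite | github.com/toontown-archipelago/toontown-archipelago | toontown/minigame/ClerkPurchase.py | __calculateRestockCost
-- ===== SOURCE A (Python) =====
-- from typing import Dict
--
-- def __calculateRestockCost(oldGags: Dict[tuple, int], newGags: Dict[tuple, int]) -> int:
--
--     # Loop through the old gags and remove any counts we have from the new gags since we already 'had them'
--     for gag, count in oldGags.items():
--
--         # If this gag is not in our new inventory, assume it was deleted and do nothing
--         if gag not in newGags:
--             continue
--
--         # Decrement the amount we had for the new gags
--         newGags[gag] -= count
--
--     # Make sure nothing went below zero
--     for gag, count in newGags.items():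
--         if count < 0:
--             newGags[gag] = 0
--
--     # See how many gags are new
--     return sum(newGags.values())
-- ===== SOURCE B (Python) =====
-- def __calculateRestockCost(oldGags, newGags):
--     # single pass over newGags: clamp-subtract via oldGags.get, summing as we go
--     # (mutates newGags in place to the same final values as the original)
--     total = 0
--     for gag, count in newGags.items():
--         v = count - oldGags.get(gag, 0)
--         if v < 0:
--             v = 0
--         newGags[gag] = v
--         total += v
--     return total
-- ===== Notes on version B (the rewrite author's own statement) =====
-- stated objective: simpler
-- what changed: A's three passes (decrement loop over oldGags, clamp loop over newGags, then sum of values) are fused into one pass over newGags that clamps count - oldGags.get(gag, 0) and accumulates the total directly; newGags is mutated to the same final values.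
import Mathlib
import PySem

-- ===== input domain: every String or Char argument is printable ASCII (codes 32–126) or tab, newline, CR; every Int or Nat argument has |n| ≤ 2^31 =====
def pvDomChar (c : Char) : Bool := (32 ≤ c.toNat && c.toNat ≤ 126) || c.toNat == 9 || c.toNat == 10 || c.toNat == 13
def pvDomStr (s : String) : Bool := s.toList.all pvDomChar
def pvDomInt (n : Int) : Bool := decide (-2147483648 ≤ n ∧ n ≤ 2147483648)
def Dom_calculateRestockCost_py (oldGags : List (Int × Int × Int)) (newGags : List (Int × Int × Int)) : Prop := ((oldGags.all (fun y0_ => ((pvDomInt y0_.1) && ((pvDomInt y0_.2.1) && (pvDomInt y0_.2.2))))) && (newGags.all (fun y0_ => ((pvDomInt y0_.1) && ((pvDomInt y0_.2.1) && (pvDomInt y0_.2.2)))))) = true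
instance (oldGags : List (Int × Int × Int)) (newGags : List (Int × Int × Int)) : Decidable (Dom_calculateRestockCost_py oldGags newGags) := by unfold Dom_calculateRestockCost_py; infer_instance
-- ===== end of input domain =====

-- B fuses A's decrement pass, clamp pass and value sum into one accumulating pass over newGags
-- (objective: simpler). A mutates newGags in place; B performs the same mutation, and the
-- equivalence proved here is about the return value.


-- shared input decoding: a dict[tuple[int,int], int] argument arrives as a flat triple list
def pvToDict (l : List (Int × Int × Int)) : PySem.Dict (Int × Int) Int :=
  PySem.Dict.ofList (l.map (fun e => ((e.1, e.2.1), e.2.2)))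

-- ===== PORT A =====
def calculateRestockCost_py (oldGags : List (Int × Int × Int)) (newGags : List (Int × Int × Int)) : Int :=
  let d0 := pvToDict oldGags
  let dN := pvToDict newGags
  -- for gag, count in oldGags.items(): if gag in newGags: newGags[gag] -= count
  let d1 := d0.items.foldl (fun d p => if d.contains p.1 then d.insert p.1 (d.getD p.1 0 - p.2) else d) dN
  -- for gag, count in newGags.items(): if count < 0: newGags[gag] = 0
  let d2 := d1.items.foldl (fun d p => if p.2 < 0 then d.insert p.1 0 else d) d1
  d2.values.sum

-- ===== PORT B =====
def calculateRestockCost_py_alt (oldGags : List (Int × Int × Int)) (newGags : List (Int × Int × Int)) : Int :=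
  let d0 := pvToDict oldGags
  let dN := pvToDict newGags
  -- total = 0; for gag, count in newGags.items(): v = count - oldGags.get(gag, 0); if v < 0: v = 0;
  --           newGags[gag] = v; total += v
  (dN.items.foldl (fun (st : Int × PySem.Dict (Int × Int) Int) p =>
      let v := p.2 - d0.getD p.1 0
      let v := if v < 0 then 0 else v
      (st.1 + v, st.2.insert p.1 v)) (0, dN)).1

-- ===== PRECONDITION & SPEC =====
def Spec_calculateRestockCost_py (oldGags : List (Int × Int × Int)) (newGags : List (Int × Int × Int)) (out : Int) : Prop := out = calculateRestockCost_py_alt oldGags newGags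
instance (oldGags : List (Int × Int × Int)) (newGags : List (Int × Int × Int)) (out : Int) : Decidable (Spec_calculateRestockCost_py oldGags newGags out) := by unfold Spec_calculateRestockCost_py; infer_instance

-- ===== CLAIM (what is proved, stated in full; the proofs are below) =====
def Claim_equal_calculateRestockCost_py : Prop := ∀ (oldGags : List (Int × Int × Int)) (newGags : List (Int × Int × Int)), Dom_calculateRestockCost_py oldGags newGags → Spec_calculateRestockCost_py oldGags newGags (calculateRestockCost_py oldGags newGags)

-- ===== LEMMAS AND PROOFS =====

-- keys are unchanged by A's decrement loop
theorem keys_loop1 (L : List ((Int × Int) × Int)) (d : PySem.Dict (Int × Int) Int) :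
    (L.foldl (fun d p => if d.contains p.1 then d.insert p.1 (d.getD p.1 0 - p.2) else d) d).keys = d.keys := by
  induction L generalizing d with
  | nil => rfl
  | cons p L ih =>
    simp only [List.foldl_cons]
    by_cases h : d.contains p.1 = true
    · rw [if_pos h, ih, PySem.Dict.keys_insert_of_contains d _ h]
    · rw [if_neg h, ih]

-- keys are unchanged by A's clamp loop (every key of L already present)
theorem keys_loop2 (L : List ((Int × Int) × Int)) (d : PySem.Dict (Int × Int) Int)
    (hs : ∀ p ∈ L, p.1 ∈ d.keys) :
    (L.foldl (fun d p => if p.2 < 0 then d.insert p.1 0 else d) d).keys = d.keys := by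
  induction L generalizing d with
  | nil => rfl
  | cons p L ih =>
    have hc : d.contains p.1 = true :=
      (PySem.Dict.contains_iff_mem_keys d p.1).mpr (hs p (List.mem_cons_self ..))
    have hk : (if p.2 < 0 then d.insert p.1 0 else d).keys = d.keys := by
      by_cases h : p.2 < 0
      · rw [if_pos h, PySem.Dict.keys_insert_of_contains d _ hc]
      · rw [if_neg h]
    simp only [List.foldl_cons]
    rw [ih _ (fun q hq => hk ▸ hs q (List.mem_cons_of_mem _ hq)), hk]

-- the decrement loop does not touch keys outside L
theorem getD_loop1_not_mem (L : List ((Int × Int) × Int)) (d : PySem.Dict (Int × Int) Int)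
    (k : Int × Int) (h : k ∉ L.map Prod.fst) :
    (L.foldl (fun d p => if d.contains p.1 then d.insert p.1 (d.getD p.1 0 - p.2) else d) d).getD k 0 = d.getD k 0 := by
  induction L generalizing d with
  | nil => rfl
  | cons p L ih =>
    simp only [List.map_cons, List.mem_cons, not_or] at h
    simp only [List.foldl_cons]
    rw [ih _ h.2]
    by_cases hc : d.contains p.1 = true
    · rw [if_pos hc, PySem.Dict.getD_insert_of_ne d _ _ h.1]
    · rw [if_neg hc]

-- the clamp loop does not touch keys outside L
theorem getD_loop2_not_mem (L : List ((Int × Int) × Int)) (d : PySem.Dict (Int × Int) Int)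
    (k : Int × Int) (h : k ∉ L.map Prod.fst) :
    (L.foldl (fun d p => if p.2 < 0 then d.insert p.1 0 else d) d).getD k 0 = d.getD k 0 := by
  induction L generalizing d with
  | nil => rfl
  | cons p L ih =>
    simp only [List.map_cons, List.mem_cons, not_or] at h
    simp only [List.foldl_cons]
    rw [ih _ h.2]
    by_cases hc : p.2 < 0
    · rw [if_pos hc, PySem.Dict.getD_insert_of_ne d _ _ h.1]
    · rw [if_neg hc]

-- pointwise effect of the decrement loop: subtract the matching values in L
theorem getD_loop1 (L : List ((Int × Int) × Int)) (d : PySem.Dict (Int × Int) Int)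
    (k : Int × Int) (hnd : (L.map Prod.fst).Nodup) (hk : k ∈ d.keys) :
    (L.foldl (fun d p => if d.contains p.1 then d.insert p.1 (d.getD p.1 0 - p.2) else d) d).getD k 0
      = d.getD k 0 - ((L.filter (fun p => p.1 == k)).map Prod.snd).sum := by
  induction L generalizing d with
  | nil => simp
  | cons p L ih =>
    simp only [List.map_cons, List.nodup_cons] at hnd
    simp only [List.foldl_cons, List.filter_cons]
    by_cases hpk : p.1 = k
    · have hc : d.contains p.1 = true := by
        rw [hpk]; exact (PySem.Dict.contains_iff_mem_keys d k).mpr hk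
      rw [if_pos hc]
      have hnm : k ∉ L.map Prod.fst := hpk ▸ hnd.1
      have hfil : L.filter (fun p => p.1 == k) = [] := by
        rw [List.filter_eq_nil_iff]
        intro q hq hqk
        have hq1 := List.mem_map_of_mem (f := Prod.fst) hq
        rw [eq_of_beq hqk] at hq1
        exact hnm hq1
      rw [getD_loop1_not_mem L _ k hnm, hpk, PySem.Dict.getD_insert_self]
      simp [hfil]
    · have hbeq : (p.1 == k) = false := beq_eq_false_iff_ne.mpr hpk
      rw [hbeq]
      simp only [Bool.false_eq_true, if_false]
      by_cases hc : d.contains p.1 = true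
      · rw [if_pos hc]
        have hk' : k ∈ (d.insert p.1 (d.getD p.1 0 - p.2)).keys := by
          rw [PySem.Dict.keys_insert_of_contains d _ hc]; exact hk
        rw [ih _ hnd.2 hk', PySem.Dict.getD_insert_of_ne d _ _ (fun h => hpk h.symm)]
      · rw [if_neg hc, ih _ hnd.2 hk]

-- in a list with distinct keys, filtering on a present key gives exactly its entry
theorem filter_eq_single (l : List ((Int × Int) × Int)) (k : Int × Int) (v : Int)
    (hnd : (l.map Prod.fst).Nodup) (hm : (k, v) ∈ l) :
    l.filter (fun p => p.1 == k) = [(k, v)] := by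
  induction l with
  | nil => cases hm
  | cons q l ih =>
    simp only [List.map_cons, List.nodup_cons] at hnd
    rcases List.mem_cons.mp hm with h | h
    · subst h
      simp only [List.filter_cons, beq_self_eq_true, if_pos]
      congr 1
      rw [List.filter_eq_nil_iff]
      intro r hr hrk
      exact hnd.1 (by simpa [eq_of_beq hrk] using List.mem_map_of_mem (f := Prod.fst) hr)
    · have hqk : (q.1 == k) = false := by
        apply beq_eq_false_iff_ne.mpr
        intro he
        have hk1 := List.mem_map_of_mem (f := Prod.fst) h
        rw [← he] at hk1
        exact hnd.1 hk1
      simp only [List.filter_cons, hqk, Bool.false_eq_true, if_false]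
      exact ih hnd.2 h

-- link a dict's getD to the filtered items list
theorem filter_items_getD (d : PySem.Dict (Int × Int) Int) (k : Int × Int) (hnd : d.keys.Nodup) :
    ((d.items.filter (fun p => p.1 == k)).map Prod.snd).sum = d.getD k 0 := by
  by_cases hc : d.contains k = true
  · rw [PySem.Dict.contains_eq_isSome_get?] at hc
    cases hg : d.get? k with
    | none => rw [hg] at hc; simp at hc
    | some v =>
      have hm : (k, v) ∈ d.items := PySem.Dict.mem_items_of_get?_eq_some d hg
      have hnd' : (d.items.map Prod.fst).Nodup := by
        simpa only [PySem.Dict.keys] using hnd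
      rw [filter_eq_single d.items k v hnd' hm]
      simp [PySem.Dict.getD_eq_get?_getD, hg]
  · have hfil : d.items.filter (fun p => p.1 == k) = [] := by
      rw [List.filter_eq_nil_iff]
      intro q hq hqk
      have : k ∈ d.keys := eq_of_beq hqk ▸ PySem.Dict.mem_keys_of_mem_items d hq
      exact hc ((PySem.Dict.contains_iff_mem_keys d k).mpr this)
    rw [hfil, PySem.Dict.getD_of_not_contains d 0 (by simpa using hc)]
    rfl

-- pointwise effect of the clamp loop
theorem getD_loop2 (L : List ((Int × Int) × Int)) (d : PySem.Dict (Int × Int) Int)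
    (k : Int × Int) (hnd : (L.map Prod.fst).Nodup) (hs : ∀ p ∈ L, d.get? p.1 = some p.2) :
    (L.foldl (fun d p => if p.2 < 0 then d.insert p.1 0 else d) d).getD k 0
      = if k ∈ L.map Prod.fst ∧ d.getD k 0 < 0 then 0 else d.getD k 0 := by
  induction L generalizing d with
  | nil => simp
  | cons p L ih =>
    simp only [List.map_cons, List.nodup_cons] at hnd
    have hgp : d.get? p.1 = some p.2 := hs p (List.mem_cons_self ..)
    have hdp : d.getD p.1 0 = p.2 := by rw [PySem.Dict.getD_eq_get?_getD, hgp]; rfl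
    simp only [List.foldl_cons]
    by_cases hpk : p.1 = k
    · subst hpk
      have hnm : p.1 ∉ L.map Prod.fst := hnd.1
      by_cases hv : p.2 < 0
      · rw [if_pos hv, getD_loop2_not_mem L _ p.1 hnm, PySem.Dict.getD_insert_self,
          if_pos ⟨List.mem_cons_self .., hdp ▸ hv⟩]
      · rw [if_neg hv, getD_loop2_not_mem L _ p.1 hnm, if_neg (by rw [hdp]; tauto)]
    · have hd' : (if p.2 < 0 then d.insert p.1 0 else d).getD k 0 = d.getD k 0 := by
        by_cases hv : p.2 < 0
        · rw [if_pos hv, PySem.Dict.getD_insert_of_ne d _ _ (fun h => hpk h.symm)]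
        · rw [if_neg hv]
      have hs' : ∀ q ∈ L, (if p.2 < 0 then d.insert p.1 0 else d).get? q.1 = some q.2 := by
        intro q hq
        have hqp : q.1 ≠ p.1 := fun h => hnd.1 (h ▸ List.mem_map_of_mem (f := Prod.fst) hq)
        by_cases hv : p.2 < 0
        · rw [if_pos hv, PySem.Dict.get?_insert_of_ne d _ hqp]
          exact hs q (List.mem_cons_of_mem _ hq)
        · rw [if_neg hv]; exact hs q (List.mem_cons_of_mem _ hq)
      rw [ih _ hnd.2 hs', hd']
      by_cases hm : k ∈ L.map Prod.fst
      · simp [hm, Ne.symm hpk]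
      · simp [hm, Ne.symm hpk]

-- B's accumulator is a plain sum (the dict component is never read)
theorem fst_loopB (d0 : PySem.Dict (Int × Int) Int) (L : List ((Int × Int) × Int))
    (t : Int) (d : PySem.Dict (Int × Int) Int) :
    (L.foldl (fun (st : Int × PySem.Dict (Int × Int) Int) p =>
      let v := p.2 - d0.getD p.1 0
      let v := if v < 0 then 0 else v
      (st.1 + v, st.2.insert p.1 v)) (t, d)).1
      = t + (L.map (fun p => if p.2 - d0.getD p.1 0 < 0 then 0 else p.2 - d0.getD p.1 0)).sum := by
  induction L generalizing t d with
  | nil => simp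
  | cons p L ih =>
    simp only [List.foldl_cons, List.map_cons, List.sum_cons]
    rw [ih]
    ring

-- ===== VERDICT (by name: the statement is the Claim_ definition above) =====
theorem calculateRestockCost_py_spec : Claim_equal_calculateRestockCost_py := by
  intro oldGags newGags _
  unfold Spec_calculateRestockCost_py calculateRestockCost_py calculateRestockCost_py_alt
  simp only []
  set d0 := pvToDict oldGags with hd0
  set dN := pvToDict newGags with hdN
  have hnd0 : d0.keys.Nodup := PySem.Dict.nodup_keys_ofList _
  have hndN : dN.keys.Nodup := PySem.Dict.nodup_keys_ofList _
  set d1 := d0.items.foldl (fun d p => if d.contains p.1 then d.insert p.1 (d.getD p.1 0 - p.2) else d) dN with hd1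
  have hkeys1 : d1.keys = dN.keys := keys_loop1 _ _
  have hnd1 : d1.keys.Nodup := hkeys1 ▸ hndN
  have hget1 : ∀ k ∈ dN.keys, d1.getD k 0 = dN.getD k 0 - d0.getD k 0 := by
    intro k hk
    rw [hd1, getD_loop1 d0.items dN k (by simpa only [PySem.Dict.keys] using hnd0) hk,
      filter_items_getD d0 k hnd0]
  set d2 := d1.items.foldl (fun d p => if p.2 < 0 then d.insert p.1 0 else d) d1 with hd2
  have hs1 : ∀ p ∈ d1.items, d1.get? p.1 = some p.2 := by
    intro p hp
    exact PySem.Dict.get?_of_mem_items d1 (by simpa using hp) hnd1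
  have hkeys2 : d2.keys = d1.keys :=
    keys_loop2 _ _ (fun p hp => PySem.Dict.mem_keys_of_mem_items d1 hp)
  have hnd2 : d2.keys.Nodup := hkeys2 ▸ hnd1
  have hget2 : ∀ k ∈ d1.keys, d2.getD k 0 = if d1.getD k 0 < 0 then 0 else d1.getD k 0 := by
    intro k hk
    rw [hd2, getD_loop2 d1.items d1 k (by simpa only [PySem.Dict.keys] using hnd1) hs1]
    have hm : k ∈ d1.items.map Prod.fst := by simpa only [PySem.Dict.keys] using hk
    by_cases hv : d1.getD k 0 < 0
    · rw [if_pos ⟨hm, hv⟩, if_pos hv]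
    · rw [if_neg (by tauto), if_neg hv]
  rw [PySem.Dict.values_eq_map_keys d2 hnd2 0, fst_loopB, PySem.Dict.items_eq_map_keys dN hndN 0,
    hkeys2, hkeys1, List.map_map, zero_add]
  apply congrArg
  apply List.map_congr_left
  intro k hk
  simp only [Function.comp]
  rw [hget2 k (hkeys1 ▸ hk), hget1 k hk]
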